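-- pv_equiv track=rewrite | github.com/pparkddo/ps | leetcode/weekly-contest/462/1.py | reverseSubmatrix
-- ===== SOURCE A (Python) =====
-- from typing import List
--
-- def reverseSubmatrix(grid: List[List[int]], x: int, y: int, k: int) -> List[List[int]]:
--     for r in range(x, x+k):
--         rr = (x + k - 1) - (r - x)
--
--         if r >= rr:
--             break
--
--         for c in range(y, y+k):
--             grid[r][c], grid[rr][c] = grid[rr][c], grid[r][c]
--
--     return grid
-- ===== SOURCE B (Python) =====
-- from typing import List
--
-- def reverseSubmatrix(grid: List[List[int]], x: int, y: int, k: int) -> List[List[int]]: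
--     if k <= 1:
--         return grid  # fewer than two rows: nothing to reverse
--     block = [grid[x+i][y:y+k] for i in range(k)]
--     block.reverse()
--     for i in range(k):
--         grid[x+i][y:y+k] = block[i]
--     return grid
-- ===== Notes on version B (the rewrite author's own statement) =====
-- stated objective: simpler
-- what changed: A reverses the k rows of the submatrix by converging two-pointer cell-by-cell swaps with a break; B returns immediately when k <= 1 (nothing to reverse) and otherwise copies the k row slices, reverses the copied list, and writes each slice back with one slice assignment per row.
-- outside the precondition, e.g. on reverseSubmatrix([[1, 2], [3, 4]], 0, -2, 2): A returns [[3, 4], [1, 2]], B returns [[1, 2], [3, 4]]; on reverseSubmatrix([[1, 2], [3, 4]], -5, 0, 2): A raises IndexError, B raises IndexError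
import Mathlib
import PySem

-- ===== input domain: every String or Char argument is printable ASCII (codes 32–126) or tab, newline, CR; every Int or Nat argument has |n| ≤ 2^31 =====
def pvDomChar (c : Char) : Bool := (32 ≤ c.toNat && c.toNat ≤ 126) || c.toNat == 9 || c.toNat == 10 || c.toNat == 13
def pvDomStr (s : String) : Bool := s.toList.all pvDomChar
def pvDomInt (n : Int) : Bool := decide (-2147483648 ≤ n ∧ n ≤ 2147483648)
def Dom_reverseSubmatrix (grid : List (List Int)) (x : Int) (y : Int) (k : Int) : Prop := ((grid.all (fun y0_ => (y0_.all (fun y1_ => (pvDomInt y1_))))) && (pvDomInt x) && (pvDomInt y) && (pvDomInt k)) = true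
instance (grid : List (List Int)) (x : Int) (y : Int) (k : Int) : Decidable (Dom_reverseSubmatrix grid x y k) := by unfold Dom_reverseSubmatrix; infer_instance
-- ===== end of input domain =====

-- B replaces A's converging two-pointer in-place cell swaps (with break) by an early return for
-- k ≤ 1 (nothing to reverse) and, otherwise, copy-the-k-row-slices, reverse the copy, write each
-- slice back (objective: simpler).  Both Pythons mutate `grid` in place and return it; the
-- equivalence proved here is about the RETURN value.

-- ===== PORT A =====
-- grid[r][c]  (Python read; exact everywhere pyGetD is)
def pvCellGet (g : List (List Int)) (r c : Int) : Int :=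
  PySem.List.pyGetD (PySem.List.pyGetD g r []) c 0
-- grid[r][c] = v ; exact for 0 ≤ r, 0 ≤ c (the only indices A's swap uses inside Pre_)
def pvCellSet (g : List (List Int)) (r c : Int) (v : Int) : List (List Int) :=
  g.modify r.toNat (fun row => row.set c.toNat v)
-- grid[r][c], grid[rr][c] = grid[rr][c], grid[r][c]
def pvSwapCols (r rr : Int) (g : List (List Int)) (c : Int) : List (List Int) :=
  let v1 := pvCellGet g rr c
  let v2 := pvCellGet g r c
  pvCellSet (pvCellSet g r c v1) rr c v2
-- the outer 'for r in range(x, x+k)' with its break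
def pvRevLoop (x y k : Int) (g : List (List Int)) : List Int → List (List Int)
  | [] => g
  | r :: rest =>
    let rr := (x + k - 1) - (r - x)
    if r ≥ rr then g
    else pvRevLoop x y k ((PySem.List.pyRange y (y + k)).foldl (pvSwapCols r rr) g) rest

def reverseSubmatrix (grid : List (List Int)) (x : Int) (y : Int) (k : Int) : List (List Int) :=
  pvRevLoop x y k grid (PySem.List.pyRange x (x + k))

-- ===== PORT B =====
-- g[r][a:b] = seg  (slice assignment, step 1); exact for 0 ≤ r < len g (the only rows B writes inside Pre_)
def pvWriteSeg (g : List (List Int)) (r a b : Int) (seg : List Int) : List (List Int) :=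
  g.modify (if r < 0 then ((g.length : Int) + r).toNat else r.toNat) (fun row =>
    row.take (PySem.List.clampIdx row.length a) ++ seg ++
      row.drop (max (PySem.List.clampIdx row.length a) (PySem.List.clampIdx row.length b)))

def reverseSubmatrix_alt (grid : List (List Int)) (x : Int) (y : Int) (k : Int) : List (List Int) :=
  if k ≤ 1 then grid
  else
    let block := (PySem.List.pyRange 0 k).map
      (fun i => PySem.List.slice (PySem.List.pyGetD grid (x + i) []) (some y) (some (y + k)))
    let block := block.reverse
    (PySem.List.pyRange 0 k).foldl
      (fun g i => pvWriteSeg g (x + i) y (y + k) (PySem.List.pyGetD block i [])) grid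

-- ===== PRECONDITION & SPEC =====
-- Pre_ excludes the inputs with k ≥ 2 whose submatrix indices reach outside the grid: there A
-- either raises (IndexError) or returns a value that depends on Python's accidental
-- negative-index/slice wraparound, which B does not reproduce.
def Pre_reverseSubmatrix (grid : List (List Int)) (x : Int) (y : Int) (k : Int) : Prop :=
  k ≤ 1 ∨
  (0 ≤ x ∧ 0 ≤ y ∧ x + k ≤ (grid.length : Int) ∧
    ∀ row ∈ (grid.drop x.toNat).take k.toNat, y + k ≤ (row.length : Int))
instance (grid : List (List Int)) (x : Int) (y : Int) (k : Int) : Decidable (Pre_reverseSubmatrix grid x y k) := by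
  unfold Pre_reverseSubmatrix; infer_instance

def pvWitness_reverseSubmatrix : List (List Int) × Int × Int × Int := ([[1, 2], [3, 4]], 0, 0, 2)

def Spec_reverseSubmatrix (grid : List (List Int)) (x : Int) (y : Int) (k : Int) (out : List (List Int)) : Prop := out = reverseSubmatrix_alt grid x y k
instance (grid : List (List Int)) (x : Int) (y : Int) (k : Int) (out : List (List Int)) : Decidable (Spec_reverseSubmatrix grid x y k out) := by unfold Spec_reverseSubmatrix; infer_instance

-- ===== CLAIM (what is proved, stated in full; the proofs are below) =====
def Claim_equal_reverseSubmatrix : Prop := ∀ (grid : List (List Int)) (x : Int) (y : Int) (k : Int), Dom_reverseSubmatrix grid x y k → Pre_reverseSubmatrix grid x y k → Spec_reverseSubmatrix grid x y k (reverseSubmatrix grid x y k)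

-- ===== LEMMAS AND PROOFS =====

-- cell (j,c) of the grid, and length of row j (defaults outside)
def cellN (g : List (List Int)) (j c : Nat) : Int := (g.getD j []).getD c 0
def rlenN (g : List (List Int)) (j : Nat) : Nat := (g.getD j []).length
-- the mirrored row index
def mirI (x k t : Int) : Int := x + k - 1 - (t - x)

lemma getD_modify_row (l : List (List Int)) (i j : Nat) (f : List Int → List Int) :
    (l.modify i f).getD j [] = if i = j ∧ j < l.length then f (l.getD j []) else l.getD j [] := by
  by_cases hl : j < l.length
  · simp [List.getD_eq_getElem?_getD, hl]
    by_cases h : i = j <;> simp [h]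
  · have : l[j]? = none := by simp; omega
    simp [List.getD_eq_getElem?_getD, hl]

lemma getD_set_elem (row : List Int) (i j : Nat) (v : Int) :
    (row.set i v).getD j 0 = if i = j ∧ j < row.length then v else row.getD j 0 := by
  by_cases h : i = j
  · subst h
    by_cases hl : i < row.length <;> simp [List.getD_eq_getElem?_getD, hl]
  · simp [List.getD_eq_getElem?_getD, h]

lemma eq_of_cells (g1 g2 : List (List Int)) (hl : g1.length = g2.length)
    (hr : ∀ j, rlenN g1 j = rlenN g2 j) (hc : ∀ j c, cellN g1 j c = cellN g2 j c) :
    g1 = g2 := by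
  apply List.ext_getElem hl
  intro j h1 h2
  apply List.ext_getElem
  · have := hr j
    simpa [rlenN, List.getD_eq_getElem?_getD, List.getElem?_eq_getElem h1,
      List.getElem?_eq_getElem h2] using this
  · intro c hc1 hc2
    have := hc j c
    simpa [cellN, List.getD_eq_getElem?_getD, List.getElem?_eq_getElem h1,
      List.getElem?_eq_getElem h2, List.getElem?_eq_getElem hc1, List.getElem?_eq_getElem hc2] using this

-- shape and cells of one assignment grid[r][c] = v
lemma rlen_cellSet (g : List (List Int)) (r c : Int) (v : Int) (j : Nat) :
    rlenN (pvCellSet g r c v) j = rlenN g j := by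
  unfold rlenN pvCellSet
  rw [getD_modify_row]
  split_ifs <;> simp

lemma len_cellSet (g : List (List Int)) (r c : Int) (v : Int) :
    (pvCellSet g r c v).length = g.length := by
  simp [pvCellSet]

lemma cell_cellSet (g : List (List Int)) (r c : Int) (v : Int) (j c' : Nat) :
    cellN (pvCellSet g r c v) j c' =
      if j = r.toNat ∧ c' = c.toNat ∧ j < g.length ∧ c' < rlenN g j then v
      else cellN g j c' := by
  unfold cellN pvCellSet rlenN
  rw [getD_modify_row]
  by_cases h1 : r.toNat = j ∧ j < g.length
  · rw [if_pos h1, getD_set_elem]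
    obtain ⟨h1a, h1b⟩ := h1
    split_ifs with h2 h3 h3 <;> first | rfl | omega
  · rw [if_neg h1]
    split_ifs with h2
    · exact absurd ⟨h2.1.symm, h2.2.2.1⟩ h1
    · rfl

-- shape and cells of one tuple-swap step
lemma swapCols_len (r rr c : Int) (g : List (List Int)) :
    (pvSwapCols r rr g c).length = g.length := by
  simp [pvSwapCols, len_cellSet]

lemma swapCols_rlen (r rr c : Int) (g : List (List Int)) (j : Nat) :
    rlenN (pvSwapCols r rr g c) j = rlenN g j := by
  simp [pvSwapCols, rlen_cellSet]

lemma swapCols_cell (r rr c : Int) (g : List (List Int))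
    (hr : 0 ≤ r) (hrr : 0 ≤ rr) (hne : r ≠ rr)
    (hrl : r.toNat < g.length) (hrrl : rr.toNat < g.length)
    (hc : 0 ≤ c) (hcr : c.toNat < rlenN g r.toNat) (hcrr : c.toNat < rlenN g rr.toNat) :
    ∀ (j c' : Nat), cellN (pvSwapCols r rr g c) j c' =
      if j = r.toNat ∧ c' = c.toNat then cellN g rr.toNat c.toNat
      else if j = rr.toNat ∧ c' = c.toNat then cellN g r.toNat c.toNat
      else cellN g j c' := by
  intro j c'
  have hnen : r.toNat ≠ rr.toNat := by omega
  show cellN (pvCellSet (pvCellSet g r c (pvCellGet g rr c)) rr c (pvCellGet g r c)) j c' = _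
  have hget1 : pvCellGet g rr c = cellN g rr.toNat c.toNat := by
    simp [pvCellGet, cellN, PySem.List.pyGetD_of_nonneg _ _ hrr, PySem.List.pyGetD_of_nonneg _ _ hc]
  have hget2 : pvCellGet g r c = cellN g r.toNat c.toNat := by
    simp [pvCellGet, cellN, PySem.List.pyGetD_of_nonneg _ _ hr, PySem.List.pyGetD_of_nonneg _ _ hc]
  rw [hget1, hget2, cell_cellSet, len_cellSet, rlen_cellSet, cell_cellSet]
  split_ifs with h1 h2 h3 h4 h5 <;>
    first | rfl | (exfalso; omega) | (rename_i hj; obtain ⟨rfl, rfl⟩ := hj; omega)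
-- the inner column loop swaps the two row segments, cell by cell
lemma inner_fold (r rr : Int) (hr : 0 ≤ r) (hrr : 0 ≤ rr) (hne : r ≠ rr) :
    ∀ (n : Nat) (c0 hi : Int), hi - c0 = (n : Int) → 0 ≤ c0 →
    ∀ (g : List (List Int)), r.toNat < g.length → rr.toNat < g.length →
      hi ≤ (rlenN g r.toNat : Int) → hi ≤ (rlenN g rr.toNat : Int) →
    ((PySem.List.pyRange c0 hi).foldl (pvSwapCols r rr) g).length = g.length ∧
    (∀ j, rlenN ((PySem.List.pyRange c0 hi).foldl (pvSwapCols r rr) g) j = rlenN g j) ∧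
    (∀ (j c : Nat), cellN ((PySem.List.pyRange c0 hi).foldl (pvSwapCols r rr) g) j c =
      if (c0 ≤ (c : Int) ∧ (c : Int) < hi) ∧ j = r.toNat then cellN g rr.toNat c
      else if (c0 ≤ (c : Int) ∧ (c : Int) < hi) ∧ j = rr.toNat then cellN g r.toNat c
      else cellN g j c) := by
  intro n
  induction n with
  | zero =>
    intro c0 hi h0 hc0 g hrl hrrl hlr hlrr
    rw [PySem.List.pyRange_one_eq_nil (by omega)]
    refine ⟨rfl, fun j => rfl, fun j c => ?_⟩
    simp only [List.foldl_nil]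
    split_ifs with h1 h2 <;> first | (exfalso; omega) | rfl
  | succ n ih =>
    intro c0 hi h0 hc0 g hrl hrrl hlr hlrr
    rw [PySem.List.pyRange_one_cons (by omega : c0 < hi)]
    simp only [List.foldl_cons]
    have hcr : c0.toNat < rlenN g r.toNat := by omega
    have hcrr : c0.toNat < rlenN g rr.toNat := by omega
    have hcell := swapCols_cell r rr c0 g hr hrr hne hrl hrrl hc0 hcr hcrr
    have hlen' : (pvSwapCols r rr g c0).length = g.length := swapCols_len r rr c0 g
    have hrlen' : ∀ j, rlenN (pvSwapCols r rr g c0) j = rlenN g j := swapCols_rlen r rr c0 g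
    obtain ⟨ihl, ihr, ihc⟩ := ih (c0 + 1) hi (by omega) (by omega) (pvSwapCols r rr g c0)
      (by rw [hlen']; exact hrl) (by rw [hlen']; exact hrrl)
      (by rw [hrlen']; exact hlr) (by rw [hrlen']; exact hlrr)
    refine ⟨by rw [ihl, hlen'], fun j => by rw [ihr, hrlen'], fun j c => ?_⟩
    rw [ihc j c, hcell rr.toNat c, hcell r.toNat c, hcell j c]
    by_cases hceq : c = c0.toNat
    · subst hceq
      split_ifs <;> first | rfl | (exfalso; omega)
    · split_ifs <;> first | rfl | (exfalso; omega)

-- the outer row loop (with its break) mirrors the rows of [r0, mirI x k r0] on columns [y, y+k)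
lemma cellN_congr2 (g : List (List Int)) (j1 j2 c1 c2 : Nat) (h1 : j1 = j2) (h2 : c1 = c2) :
    cellN g j1 c1 = cellN g j2 c2 := by rw [h1, h2]

lemma outer_loop (x y k : Int) (hx : 0 ≤ x) (hy : 0 ≤ y) (hk : 1 ≤ k) :
    ∀ (n : Nat) (r0 : Int), x + k - r0 = (n : Int) → x ≤ r0 →
    ∀ (g : List (List Int)), x + k ≤ (g.length : Int) →
      (∀ j : Nat, x ≤ (j : Int) → (j : Int) < x + k → y + k ≤ (rlenN g j : Int)) →
    (pvRevLoop x y k g (PySem.List.pyRange r0 (x + k))).length = g.length ∧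
    (∀ j, rlenN (pvRevLoop x y k g (PySem.List.pyRange r0 (x + k))) j = rlenN g j) ∧
    (∀ (j c : Nat), cellN (pvRevLoop x y k g (PySem.List.pyRange r0 (x + k))) j c =
      if r0 ≤ (j : Int) ∧ (j : Int) ≤ mirI x k r0 ∧ y ≤ (c : Int) ∧ (c : Int) < y + k
      then cellN g (mirI x k (j : Int)).toNat c else cellN g j c) := by
  intro n
  induction n with
  | zero =>
    intro r0 h0 hr0 g hlen hrows
    rw [PySem.List.pyRange_one_eq_nil (by omega)]
    refine ⟨rfl, fun j => rfl, fun j c => ?_⟩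
    simp only [pvRevLoop, mirI]
    split_ifs with h1 <;> first | (exfalso; omega) | rfl
  | succ n ih =>
    intro r0 h0 hr0 g hlen hrows
    rw [PySem.List.pyRange_one_cons (by omega : r0 < x + k)]
    simp only [pvRevLoop]
    by_cases hbrk : r0 ≥ x + k - 1 - (r0 - x)
    · rw [if_pos hbrk]
      refine ⟨rfl, fun j => rfl, fun j c => ?_⟩
      simp only [mirI]
      split_ifs with h1
      · exact cellN_congr2 g j _ c c (by omega) rfl
      · rfl
    · rw [if_neg hbrk]
      have hrr0 : r0 < x + k - 1 - (r0 - x) := by omega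
      have hinner := inner_fold r0 (x + k - 1 - (r0 - x)) (by omega) (by omega) (by omega)
        k.toNat y (y + k) (by omega) hy g (by omega) (by omega)
        (hrows r0.toNat (by omega) (by omega))
        (hrows (x + k - 1 - (r0 - x)).toNat (by omega) (by omega))
      obtain ⟨Flen, Frlen, F⟩ := hinner
      obtain ⟨ihl, ihr, ihc⟩ := ih (r0 + 1) (by omega) (by omega)
        ((PySem.List.pyRange y (y + k)).foldl (pvSwapCols r0 (x + k - 1 - (r0 - x))) g)
        (by rw [Flen]; exact hlen)
        (fun j hj1 hj2 => by rw [Frlen]; exact hrows j hj1 hj2)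
      refine ⟨by rw [ihl, Flen], fun j => by rw [ihr, Frlen], fun j c => ?_⟩
      rw [ihc j c]
      rw [F (mirI x k (j : Int)).toNat c]
      rw [F j c]
      simp only [mirI]
      split_ifs <;>
        first
          | rfl
          | (exfalso; omega)
          | (apply cellN_congr2 <;> omega)

-- one slice assignment g[r][y:y+k] = seg, r and the slice in range, |seg| = k
lemma writeSeg_props (g : List (List Int)) (r y k : Int) (seg : List Int)
    (hr : 0 ≤ r) (hrl : r.toNat < g.length) (hy : 0 ≤ y) (hk : 0 ≤ k)
    (hrow : y + k ≤ (rlenN g r.toNat : Int)) (hseg : seg.length = k.toNat) :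
    (pvWriteSeg g r y (y + k) seg).length = g.length ∧
    (∀ j, rlenN (pvWriteSeg g r y (y + k) seg) j = rlenN g j) ∧
    (∀ (j c : Nat), cellN (pvWriteSeg g r y (y + k) seg) j c =
      if j = r.toNat ∧ y ≤ (c : Int) ∧ (c : Int) < y + k then seg.getD ((c : Int) - y).toNat 0
      else cellN g j c) := by
  have hlo : PySem.List.clampIdx (rlenN g r.toNat) y = y.toNat := by
    simp only [PySem.List.clampIdx]; split_ifs <;> omega
  have hhi : PySem.List.clampIdx (rlenN g r.toNat) (y + k) = (y + k).toNat := by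
    simp only [PySem.List.clampIdx]; split_ifs <;> omega
  have hmax : max (PySem.List.clampIdx (rlenN g r.toNat) y)
      (PySem.List.clampIdx (rlenN g r.toNat) (y + k)) = y.toNat + seg.length := by
    rw [hlo, hhi]; omega
  have hrowfun : ∀ row : List Int, row = g.getD r.toNat [] →
      row.take (PySem.List.clampIdx row.length y) ++ seg ++
        row.drop (max (PySem.List.clampIdx row.length y) (PySem.List.clampIdx row.length (y + k)))
      = row.take y.toNat ++ seg ++ row.drop (y.toNat + seg.length) := by
    intro row hrow
    have : row.length = rlenN g r.toNat := by rw [hrow]; rfl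
    rw [this, hmax, hlo]
  have htake : (List.take y.toNat (g.getD r.toNat [])).length = y.toNat := by
    rw [List.length_take]; unfold rlenN at hrow; omega
  have hifr : (if r < 0 then ((g.length : Int) + r).toNat else r.toNat) = r.toNat := by
    rw [if_neg (by omega)]
  refine ⟨by simp [pvWriteSeg], fun j => ?_, fun j c => ?_⟩
  · unfold rlenN pvWriteSeg
    rw [hifr, getD_modify_row]
    split_ifs with h
    · obtain ⟨rfl, hlt⟩ := h
      rw [hrowfun _ rfl]
      simp only [List.length_append, List.length_drop, htake]
      unfold rlenN at hrow
      omega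
    · rfl
  · unfold cellN pvWriteSeg
    rw [hifr, getD_modify_row]
    by_cases hj : r.toNat = j ∧ j < g.length
    · obtain ⟨rfl, hjl⟩ := hj
      rw [if_pos ⟨rfl, hjl⟩]
      rw [hrowfun _ rfl]
      by_cases hc1 : (c : Int) < y
      · rw [if_neg (by omega)]
        rw [List.getD_eq_getElem?_getD, List.getElem?_append_left
          (by rw [List.length_append, htake]; omega),
          List.getElem?_append_left (by rw [htake]; omega),
          List.getElem?_take_of_lt (by omega), ← List.getD_eq_getElem?_getD]
      · by_cases hc2 : (c : Int) < y + k
        · rw [if_pos ⟨rfl, by omega, hc2⟩]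
          rw [List.getD_eq_getElem?_getD, List.getElem?_append_left
            (by rw [List.length_append, htake]; omega),
            List.getElem?_append_right (by rw [htake]; omega), htake,
            ← List.getD_eq_getElem?_getD]
          congr 1
          omega
        · rw [if_neg (by omega)]
          rw [List.getD_eq_getElem?_getD, List.getElem?_append_right
            (by rw [List.length_append, htake]; omega),
            List.getElem?_drop, ← List.getD_eq_getElem?_getD]
          apply congrFun
          apply congrArg
          rw [List.length_append, htake]
          unfold rlenN at hrow
          omega
    · rw [if_neg hj]
      rw [if_neg (by intro h; exact hj ⟨h.1.symm, by
        by_contra hlen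
        have : g.getD j [] = [] := by
          rw [List.getD_eq_getElem?_getD]
          rw [List.getElem?_eq_none_iff.mpr (by omega)]
          rfl
        rw [h.1] at this
        unfold rlenN at hrow
        rw [this] at hrow
        simp at hrow
        omega⟩)]

-- the write-back loop of B, from index i0 on
lemma write_fold (x y k : Int) (hx : 0 ≤ x) (hy : 0 ≤ y) (B : List (List Int))
    (hB : ∀ i : Nat, (i : Int) < k → (B.getD i []).length = k.toNat) :
    ∀ (n : Nat) (i0 : Int), k - i0 = (n : Int) → 0 ≤ i0 →
    ∀ (g : List (List Int)), x + k ≤ (g.length : Int) →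
      (∀ j : Nat, x ≤ (j : Int) → (j : Int) < x + k → y + k ≤ (rlenN g j : Int)) →
    (((PySem.List.pyRange i0 k).foldl
        (fun g i => pvWriteSeg g (x + i) y (y + k) (PySem.List.pyGetD B i [])) g)).length = g.length ∧
    (∀ j, rlenN ((PySem.List.pyRange i0 k).foldl
        (fun g i => pvWriteSeg g (x + i) y (y + k) (PySem.List.pyGetD B i [])) g) j = rlenN g j) ∧
    (∀ (j c : Nat), cellN ((PySem.List.pyRange i0 k).foldl
        (fun g i => pvWriteSeg g (x + i) y (y + k) (PySem.List.pyGetD B i [])) g) j c =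
      if x + i0 ≤ (j : Int) ∧ (j : Int) < x + k ∧ y ≤ (c : Int) ∧ (c : Int) < y + k
      then cellN B ((j : Int) - x).toNat ((c : Int) - y).toNat
      else cellN g j c) := by
  intro n
  induction n with
  | zero =>
    intro i0 h0 hi0 g hlen hrows
    rw [PySem.List.pyRange_one_eq_nil (by omega)]
    refine ⟨rfl, fun j => rfl, fun j c => ?_⟩
    simp only [List.foldl_nil]
    split_ifs with h <;> first | (exfalso; omega) | rfl
  | succ n ih =>
    intro i0 h0 hi0 g hlen hrows
    rw [PySem.List.pyRange_one_cons (by omega : i0 < k)]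
    simp only [List.foldl_cons]
    have hseg : (PySem.List.pyGetD B i0 ([] : List Int)).length = k.toNat := by
      rw [PySem.List.pyGetD_of_nonneg _ _ hi0]; exact hB i0.toNat (by omega)
    obtain ⟨Wlen, Wrlen, Wc⟩ := writeSeg_props g (x + i0) y k (PySem.List.pyGetD B i0 [])
      (by omega) (by omega) hy (by omega)
      (hrows (x + i0).toNat (by omega) (by omega)) hseg
    obtain ⟨ihl, ihr, ihc⟩ := ih (i0 + 1) (by omega) (by omega)
      (pvWriteSeg g (x + i0) y (y + k) (PySem.List.pyGetD B i0 []))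
      (by rw [Wlen]; exact hlen)
      (fun j hj1 hj2 => by rw [Wrlen]; exact hrows j hj1 hj2)
    refine ⟨by rw [ihl, Wlen], fun j => by rw [ihr, Wrlen], fun j c => ?_⟩
    rw [ihc j c, Wc j c]
    split_ifs <;>
      first
        | rfl
        | (exfalso; omega)
        | (rw [PySem.List.pyGetD_of_nonneg _ _ hi0]
           exact cellN_congr2 B _ _ _ _ (by omega) rfl)

-- A's result: unfolded to its loop
lemma A_eq (grid : List (List Int)) (x y k : Int) :
    reverseSubmatrix grid x y k = pvRevLoop x y k grid (PySem.List.pyRange x (x + k)) := rfl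

-- B's result for k ≥ 2: the write-back loop over the reversed block
lemma B_eq (grid : List (List Int)) (x y k : Int) (hk : ¬ k ≤ 1) :
    reverseSubmatrix_alt grid x y k =
      (PySem.List.pyRange 0 k).foldl
        (fun g i => pvWriteSeg g (x + i) y (y + k)
          (PySem.List.pyGetD (((PySem.List.pyRange 0 k).map
            (fun i => PySem.List.slice (PySem.List.pyGetD grid (x + i) []) (some y) (some (y + k)))).reverse) i []))
        grid := by
  simp only [reverseSubmatrix_alt, if_neg hk]

theorem main_equal (grid : List (List Int)) (x y k : Int)
    (hpre : Pre_reverseSubmatrix grid x y k) :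
    reverseSubmatrix grid x y k = reverseSubmatrix_alt grid x y k := by
  by_cases hk : k ≤ 1
  · -- fewer than two rows: A's loop is empty or breaks at once; B returns grid by its guard
    rw [A_eq]
    simp only [reverseSubmatrix_alt, if_pos hk]
    by_cases hk0 : k ≤ 0
    · rw [PySem.List.pyRange_one_eq_nil (by omega : x + k ≤ x)]
      rfl
    · have hk1 : k = 1 := by omega
      subst hk1
      rw [PySem.List.pyRange_one_singleton x]
      simp only [pvRevLoop]
      rw [if_pos (by omega : x ≥ x + 1 - 1 - (x - x))]
  · rcases hpre with h | ⟨hx, hy, hlen, hrows⟩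
    · omega
    have hk1 : 1 ≤ k := by omega
    -- the per-row length bound, in indexed form
    have hrowsN : ∀ j : Nat, x ≤ (j : Int) → (j : Int) < x + k → y + k ≤ (rlenN grid j : Int) := by
      intro j hj1 hj2
      have hjl : j < grid.length := by omega
      have hidx : j - x.toNat < ((grid.drop x.toNat).take k.toNat).length := by
        simp only [List.length_take, List.length_drop]; omega
      have hget : ((grid.drop x.toNat).take k.toNat)[j - x.toNat]'hidx = grid[j]'hjl := by
        rw [List.getElem_take, List.getElem_drop]; congr 1; omega
      have hmem : grid[j]'hjl ∈ (grid.drop x.toNat).take k.toNat := by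
        rw [← hget]; exact List.getElem_mem hidx
      have := hrows _ hmem
      unfold rlenN
      rwa [List.getD_eq_getElem?_getD, List.getElem?_eq_getElem hjl]
    -- the block of copied slices, reversed
    set B0 := (PySem.List.pyRange 0 k).map
      (fun i => PySem.List.slice (PySem.List.pyGetD grid (x + i) []) (some y) (some (y + k))) with hB0
    have hB0len : B0.length = k.toNat := by
      rw [hB0, List.length_map, PySem.List.length_pyRange_one]; congr 1; omega
    have hB0get : ∀ m : Nat, m < k.toNat → B0.getD m [] =
        PySem.List.slice (PySem.List.pyGetD grid (x + (m : Int)) []) (some y) (some (y + k)) := by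
      intro m hm
      have hml : m < (PySem.List.pyRange 0 k).length := by
        rw [PySem.List.length_pyRange_one]; omega
      rw [hB0, List.getD_eq_getElem?_getD, List.getElem?_map,
        List.getElem?_eq_getElem hml, PySem.List.getElem_pyRange_one]
      simp
    -- each block slice, elementwise
    have hslice : ∀ m : Nat, m < k.toNat →
        ((B0.getD m []).length = k.toNat ∧
         ∀ q : Nat, q < k.toNat → (B0.getD m []).getD q 0 = cellN grid (x + (m : Int)).toNat (y.toNat + q)) := by
      intro m hm
      have hrow := hrowsN (x + (m : Int)).toNat (by omega) (by omega)
      rw [hB0get m hm, PySem.List.pyGetD_of_nonneg _ _ (by omega : (0:Int) ≤ x + (m : Int)),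
        PySem.List.slice_toNat _ hy (by omega)]
      have hdl : ((grid.getD (x + (m : Int)).toNat []).drop y.toNat).length
          = rlenN grid (x + (m : Int)).toNat - y.toNat := by
        rw [List.length_drop]; rfl
      constructor
      · rw [List.length_take, hdl]; omega
      · intro q hq
        rw [List.getD_eq_getElem?_getD,
          List.getElem?_take_of_lt (by omega), List.getElem?_drop,
          ← List.getD_eq_getElem?_getD]
        rfl
    have hB : ∀ i : Nat, (i : Int) < k → ((B0.reverse).getD i []).length = k.toNat := by
      intro i hi
      rw [List.getD_reverse i (by omega), hB0len]
      exact (hslice (k.toNat - 1 - i) (by omega)).1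
    obtain ⟨Alen, Arlen, Acell⟩ := outer_loop x y k hx hy hk1 k.toNat x (by omega) le_rfl grid hlen hrowsN
    obtain ⟨Blen, Brlen, Bcell⟩ := write_fold x y k hx hy B0.reverse hB k.toNat 0 (by omega) le_rfl grid hlen hrowsN
    rw [A_eq, B_eq grid x y k hk, ← hB0]
    apply eq_of_cells
    · rw [Alen, Blen]
    · intro j; rw [Arlen, Brlen]
    · intro j c
      rw [Acell j c, Bcell j c]
      by_cases hreg : x ≤ (j : Int) ∧ (j : Int) < x + k ∧ y ≤ (c : Int) ∧ (c : Int) < y + k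
      · rw [if_pos (by simp only [mirI]; omega), if_pos (by omega)]
        -- evaluate B's cell back to a cell of grid
        have hi : ((j : Int) - x).toNat < k.toNat := by omega
        have e1 : cellN B0.reverse ((j : Int) - x).toNat ((c : Int) - y).toNat
            = (B0.getD (k.toNat - 1 - ((j : Int) - x).toNat) []).getD ((c : Int) - y).toNat 0 := by
          unfold cellN
          rw [List.getD_reverse _ (by omega), hB0len]
        rw [e1, (hslice _ (by omega)).2 ((c : Int) - y).toNat (by omega)]
        exact cellN_congr2 grid _ _ _ _ (by simp only [mirI]; omega) (by omega)
      · rw [if_neg (by simp only [mirI]; omega), if_neg (by omega)]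

-- ===== VERDICT (by name: the statement is the Claim_ definition above) =====
theorem reverseSubmatrix_spec : Claim_equal_reverseSubmatrix := by
  intro grid x y k _hdom hpre
  unfold Spec_reverseSubmatrix
  exact main_equal grid x y k hpre
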